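-- pv_equiv track=rewrite | github.com/taehwakkwon/algorithm | 데일리과제/특별한 정렬.py | strange_sort
-- ===== SOURCE A (Python) =====
-- def strange_sort(numbers):
--     new_list = []
--     for i in range(len(numbers)):
--         for j in range(len(numbers)):
--             if numbers[i] > numbers[j]:
--                 numbers[i], numbers[j] = numbers[j], numbers[i]
--     left = 0
--     right = len(numbers) - 1
--     while left < right:
--         new_list.append(numbers[left])
--         new_list.append(numbers[right])
--         left += 1
--         right -= 1
--
--     return ' '.join(map(str,new_list[:10]))
-- ===== SOURCE B (Python) =====
-- # B: single pass keeping only the 5 largest and 5 smallest (bounded insertion),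
-- # no full sort; NOTE: unlike A, B does not mutate its argument.
-- def _best5(numbers, better):
--     best = []
--     for x in numbers:
--         pos = len(best)
--         while pos > 0 and better(x, best[pos - 1]):
--             pos -= 1
--         if pos < 5:
--             best = (best[:pos] + [x] + best[pos:])[:5]
--     return best
--
-- def strange_sort(numbers):
--     big = _best5(numbers, lambda a, b: a > b)
--     small = _best5(numbers, lambda a, b: a < b)
--     k = min(5, len(numbers) // 2)
--     out = []
--     for i in range(k):
--         out.append(big[i])
--         out.append(small[i])
--     return ' '.join(map(str, out))
-- ===== Notes on version B (the rewrite author's own statement) =====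
-- stated objective: faster
-- what changed: B replaces A's O(n^2) swap-based full sort plus a two-pointer end-interleave by a single O(n) pass that maintains only the 5 largest and 5 smallest elements in bounded insertion lists, then interleaves those min(5, n//2) pairs directly; B does not mutate the input list, while A sorts it in place.
import Mathlib
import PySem

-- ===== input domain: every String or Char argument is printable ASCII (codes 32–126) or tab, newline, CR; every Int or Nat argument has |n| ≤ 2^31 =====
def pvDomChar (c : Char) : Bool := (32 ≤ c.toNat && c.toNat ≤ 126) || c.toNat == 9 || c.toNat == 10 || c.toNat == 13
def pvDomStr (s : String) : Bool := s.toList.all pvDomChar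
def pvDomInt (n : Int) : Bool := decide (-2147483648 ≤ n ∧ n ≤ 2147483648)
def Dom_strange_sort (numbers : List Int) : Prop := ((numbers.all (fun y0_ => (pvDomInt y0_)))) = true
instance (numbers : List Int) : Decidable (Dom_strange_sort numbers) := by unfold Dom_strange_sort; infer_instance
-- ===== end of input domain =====

-- B replaces A's quadratic in-place swap sort + two-pointer interleave by one pass keeping only the
-- 5 largest / 5 smallest; A mutates its Python argument (sorts it in place), B does not — the
-- equivalence proved here is about the return value.

-- ===== PORT A =====
-- the `while left < right` loop of A
def pvTwoPtr (nums : List Int) (left right : Int) (acc : List Int) : List Int :=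
  if left < right then
    pvTwoPtr nums (left + 1) (right - 1)
      (acc ++ [PySem.List.pyGetD nums left 0, PySem.List.pyGetD nums right 0])
  else acc
termination_by (right - left).toNat
decreasing_by omega

def strange_sort (numbers : List Int) : String :=
  let n : Int := (numbers.length : Int)
  let nums := (PySem.List.pyRange 0 n).foldl (fun a i =>
    (PySem.List.pyRange 0 n).foldl (fun a j =>
      if PySem.List.pyGetD a i 0 > PySem.List.pyGetD a j 0
      then (a.set i.toNat (PySem.List.pyGetD a j 0)).set j.toNat (PySem.List.pyGetD a i 0)
      else a) a) numbers
  let new_list := pvTwoPtr nums 0 (n - 1) []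
  PySem.Str.join " " ((PySem.List.slice new_list none (some 10)).map PySem.Int.toStr)

-- ===== PORT B =====
-- the `while pos > 0 and better(x, best[pos-1])` scan of Source B
def pvBestPos (best : List Int) (x : Int) (better : Int → Int → Bool) : Nat → Nat
  | 0 => 0
  | p + 1 => if better x (PySem.List.pyGetD best (p : Int) 0) then pvBestPos best x better p else p + 1

-- Source B's `(best[:pos] + [x] + best[pos:])[:5]` — slices with Nat bounds, exactly take/drop
def pvBest5 (numbers : List Int) (better : Int → Int → Bool) : List Int :=
  numbers.foldl (fun best x =>
    let pos := pvBestPos best x better best.length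
    if pos < 5 then ((best.take pos ++ [x]) ++ best.drop pos).take 5 else best) []

def strange_sort_alt (numbers : List Int) : String :=
  let big := pvBest5 numbers (fun a b => decide (a > b))
  let small := pvBest5 numbers (fun a b => decide (a < b))
  let k : Int := min 5 (PySem.Int.floordiv (numbers.length : Int) 2)
  let out := (PySem.List.pyRange 0 k).foldl
    (fun acc i => acc ++ [PySem.List.pyGetD big i 0, PySem.List.pyGetD small i 0]) []
  PySem.Str.join " " (out.map PySem.Int.toStr)

-- ===== PRECONDITION & SPEC =====
def Spec_strange_sort (numbers : List Int) (out : String) : Prop := out = strange_sort_alt numbers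
instance (numbers : List Int) (out : String) : Decidable (Spec_strange_sort numbers out) := by unfold Spec_strange_sort; infer_instance

-- ===== CLAIM (what is proved, stated in full; the proofs are below) =====
def Claim_equal_strange_sort : Prop := ∀ (numbers : List Int), Dom_strange_sort numbers → Spec_strange_sort numbers (strange_sort numbers)

-- ===== LEMMAS AND PROOFS =====

-- ---------- A side: the nested swap loop sorts descending ----------

-- one inner-loop body of A, on Nat indices
def pvStep (i : Nat) (a : List Int) (j : Nat) : List Int :=
  if a.getD i 0 > a.getD j 0
  then (a.set i (a.getD j 0)).set j (a.getD i 0)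
  else a

lemma pvStep_length (i : Nat) (a : List Int) (j : Nat) : (pvStep i a j).length = a.length := by
  simp only [pvStep]
  split <;> simp

lemma pvConsSetPerm : ∀ (t : List Int) (q : Nat) (h : Int), q < t.length →
    ((t.getD q 0) :: t.set q h).Perm (h :: t) := by
  intro t
  induction t with
  | nil => intro q h hq; simp at hq
  | cons z u ih =>
    intro q h hq
    cases q with
    | zero =>
      simp only [List.getD_cons_zero, List.set_cons_zero]
      exact List.Perm.swap h z u
    | succ p =>
      simp only [List.getD_cons_succ, List.set_cons_succ]
      have hp : p < u.length := by simp at hq; omega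
      exact ((List.Perm.swap z (u.getD p 0) (u.set p h)).trans
        (List.Perm.cons z (ih p h hp))).trans (List.Perm.swap h z u)

lemma pvSetSetPerm : ∀ (a : List Int) (i j : Nat), i < a.length → j < a.length →
    ((a.set i (a.getD j 0)).set j (a.getD i 0)).Perm a := by
  intro a
  induction a with
  | nil => intro i j hi _; simp at hi
  | cons h t ih =>
    intro i j hi hj
    cases i with
    | zero =>
      cases j with
      | zero =>
        simp only [List.getD_cons_zero, List.set_cons_zero]
        exact List.Perm.refl _
      | succ q =>
        simp only [List.getD_cons_zero, List.getD_cons_succ, List.set_cons_zero,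
          List.set_cons_succ]
        exact pvConsSetPerm t q h (by simp at hj; omega)
    | succ p =>
      cases j with
      | zero =>
        simp only [List.getD_cons_zero, List.getD_cons_succ, List.set_cons_zero,
          List.set_cons_succ]
        exact pvConsSetPerm t p h (by simp at hi; omega)
      | succ q =>
        simp only [List.getD_cons_succ, List.set_cons_succ]
        exact List.Perm.cons h (ih p q (by simp at hi; omega) (by simp at hj; omega))

lemma pvStep_perm (i : Nat) (a : List Int) (j : Nat)
    (hi : i < a.length) (hj : j < a.length) : (pvStep i a j).Perm a := by
  simp only [pvStep]
  split
  · exact pvSetSetPerm a i j hi hj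
  · exact List.Perm.refl a

-- the invariant of the inner loop at outer index i:
-- (1) the prefix below i is descending, (2) entries below j are ≥ the entry at i
def pvInv (i j : Nat) (a : List Int) : Prop :=
  (∀ p q, p ≤ q → q < i → q < a.length → a.getD q 0 ≤ a.getD p 0) ∧
  (∀ t, t < j → t < a.length → a.getD i 0 ≤ a.getD t 0)

lemma pvSwapGet (a : List Int) (i j t : Nat) (ht : t < a.length) :
    ((a.set i (a.getD j 0)).set j (a.getD i 0)).getD t 0
    = if t = j then a.getD i 0 else if t = i then a.getD j 0 else a.getD t 0 := by
  have htb : t < ((a.set i (a.getD j 0)).set j (a.getD i 0)).length := by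
    simpa using ht
  rw [List.getD_eq_getElem _ _ htb]
  simp only [List.getElem_set]
  by_cases htj : t = j
  · rw [if_pos htj.symm, if_pos htj]
  · rw [if_neg (fun e => htj e.symm), if_neg htj]
    by_cases hti : t = i
    · rw [if_pos hti.symm, if_pos hti]
    · rw [if_neg (fun e => hti e.symm), if_neg hti, List.getD_eq_getElem _ _ ht]

lemma pvStep_inv (i j : Nat) (a : List Int) (hi : i < a.length) (hj : j < a.length)
    (h : pvInv i j a) : pvInv i (j + 1) (pvStep i a j) := by
  obtain ⟨h1, h2⟩ := h
  simp only [pvStep]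
  by_cases hlt : a.getD j 0 < a.getD i 0
  · rw [if_pos hlt]
    have hij : i ≠ j := by intro e; rw [e] at hlt; exact lt_irrefl _ hlt
    have hbget : ∀ t, t < a.length →
        ((a.set i (a.getD j 0)).set j (a.getD i 0)).getD t 0
        = if t = j then a.getD i 0 else if t = i then a.getD j 0 else a.getD t 0 :=
      fun t ht => pvSwapGet a i j t ht
    constructor
    · -- prefix below i stays descending
      intro p q hpq hqi hql
      simp only [List.length_set] at hql
      have hpl : p < a.length := by omega
      rw [hbget q hql, hbget p hpl]
      by_cases hqj : q = j
      · by_cases hpj : p = j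
        · rw [if_pos hqj, if_pos hpj]
        · have hpi : p ≠ i := by omega
          rw [if_pos hqj, if_neg hpj, if_neg hpi]
          exact h2 p (by omega) hpl
      · have hqi' : q ≠ i := by omega
        rw [if_neg hqj, if_neg hqi']
        by_cases hpj : p = j
        · rw [if_pos hpj]
          have hq := h1 p q hpq hqi hql
          rw [hpj] at hq
          exact le_trans hq (le_of_lt hlt)
        · have hpi : p ≠ i := by omega
          rw [if_neg hpj, if_neg hpi]
          exact h1 p q hpq hqi hql
    · -- entries below j+1 are ≥ the (new) entry at i
      intro t ht htl
      simp only [List.length_set] at htl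
      rw [hbget t htl, hbget i hi, if_neg hij, if_pos rfl]
      by_cases htj : t = j
      · rw [if_pos htj]; exact le_of_lt hlt
      · rw [if_neg htj]
        by_cases hti : t = i
        · rw [if_pos hti]
        · rw [if_neg hti]
          have htj' : t < j := by omega
          rcases lt_or_gt_of_ne hij with hij1 | hij1
          · exact le_trans (le_of_lt hlt) (h2 t htj' htl)
          · exact h1 t j (by omega) (by omega) hj
  · rw [if_neg hlt]
    refine ⟨h1, ?_⟩
    intro t ht htl
    by_cases htj : t = j
    · rw [htj]; exact le_of_not_gt hlt
    · exact h2 t (by omega) htl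

lemma pvInner_facts (i : Nat) (a : List Int) (hi : i < a.length)
    (h : pvInv i 0 a) : ∀ m, m ≤ a.length →
    pvInv i m ((List.range m).foldl (pvStep i) a) ∧
    ((List.range m).foldl (pvStep i) a).length = a.length ∧
    ((List.range m).foldl (pvStep i) a).Perm a := by
  intro m
  induction m with
  | zero => intro _; exact ⟨h, rfl, List.Perm.refl a⟩
  | succ m ih =>
    intro hm
    obtain ⟨hinv, hlen, hperm⟩ := ih (by omega)
    rw [List.range_succ, List.foldl_append, List.foldl_cons, List.foldl_nil]
    refine ⟨pvStep_inv i m _ (by rw [hlen]; exact hi) (by rw [hlen]; omega) hinv, ?_, ?_⟩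
    · rw [pvStep_length]; exact hlen
    · exact (pvStep_perm i _ m (by rw [hlen]; exact hi) (by rw [hlen]; omega)).trans hperm

lemma pvOuter_facts (numbers : List Int) :
    ∀ m, m ≤ numbers.length →
    (∀ p q, p ≤ q → q < m → q < numbers.length →
      ((List.range m).foldl (fun a i => (List.range numbers.length).foldl (pvStep i) a) numbers).getD q 0 ≤
      ((List.range m).foldl (fun a i => (List.range numbers.length).foldl (pvStep i) a) numbers).getD p 0) ∧
    ((List.range m).foldl (fun a i => (List.range numbers.length).foldl (pvStep i) a) numbers).length = numbers.length ∧
    ((List.range m).foldl (fun a i => (List.range numbers.length).foldl (pvStep i) a) numbers).Perm numbers := by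
  intro m
  induction m with
  | zero =>
    intro _
    exact ⟨by intro p q _ hq _; omega, rfl, List.Perm.refl numbers⟩
  | succ m ih =>
    intro hm
    obtain ⟨hpref, hlen, hperm⟩ := ih (by omega)
    simp only [List.range_succ, List.foldl_append, List.foldl_cons, List.foldl_nil]
    set prev := (List.range m).foldl (fun a i => (List.range numbers.length).foldl (pvStep i) a) numbers with hprev
    have hmlt : m < prev.length := by rw [hlen]; omega
    have hinv0 : pvInv m 0 prev := by
      refine ⟨?_, ?_⟩
      · intro p q hpq hqm hql
        rw [hlen] at hql
        exact hpref p q hpq hqm hql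
      · intro t ht _; omega
    obtain ⟨⟨i1, i2⟩, l2, p2⟩ :=
      pvInner_facts m prev hmlt hinv0 numbers.length (by rw [hlen])
    refine ⟨?_, by rw [l2, hlen], p2.trans hperm⟩
    intro p q hpq hqm1 hql
    have hqcur : q < ((List.range numbers.length).foldl (pvStep m) prev).length := by
      rw [l2, hlen]; exact hql
    by_cases hq : q < m
    · exact i1 p q hpq hq hqcur
    · have hq' : q = m := by omega
      subst hq'
      exact i2 p (by omega) (by rw [l2, hlen]; omega)

-- the A-loop result, named
def pvSortA (numbers : List Int) : List Int :=
  (List.range numbers.length).foldl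
    (fun a i => (List.range numbers.length).foldl (pvStep i) a) numbers

lemma pvSortA_len (numbers : List Int) : (pvSortA numbers).length = numbers.length :=
  (pvOuter_facts numbers numbers.length le_rfl).2.1

lemma pvSortA_eq (numbers : List Int) :
    pvSortA numbers = (PySem.List.sorted numbers (fun v => v)).reverse := by
  obtain ⟨hpref0, hlen0, hperm0⟩ := pvOuter_facts numbers numbers.length le_rfl
  have hpref : ∀ p q, p ≤ q → q < numbers.length → q < numbers.length →
      (pvSortA numbers).getD q 0 ≤ (pvSortA numbers).getD p 0 := hpref0
  have hlen : (pvSortA numbers).length = numbers.length := hlen0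
  have hperm : (pvSortA numbers).Perm numbers := hperm0
  have hpair : (pvSortA numbers).Pairwise (fun a b => b ≤ a) := by
    rw [List.pairwise_iff_getElem]
    intro p q hp hq hpq
    have h := hpref p q (by omega) (by rw [← hlen]; exact hq) (by rw [← hlen]; exact hq)
    rw [List.getD_eq_getElem _ _ hq, List.getD_eq_getElem _ _ hp] at h
    exact h
  have hs : PySem.List.sorted numbers (fun v => v) = (pvSortA numbers).reverse := by
    apply PySem.List.sorted_id_eq_of_perm_of_pairwise
    · exact ((pvSortA numbers).reverse_perm).trans hperm
    · rw [List.pairwise_reverse]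
      exact hpair
  rw [hs, List.reverse_reverse]

-- bridge: A's Int-indexed pyRange folds are the Nat-indexed folds
lemma pvFoldSortInner (iN : Nat) (a : List Int) (m : Nat) :
    List.foldl (fun (b : List Int) (j : Int) =>
      if PySem.List.pyGetD b ((iN : Int)) 0 > PySem.List.pyGetD b j 0
      then (b.set ((iN : Int)).toNat (PySem.List.pyGetD b j 0)).set j.toNat (PySem.List.pyGetD b ((iN : Int)) 0)
      else b) a (List.map (fun (k : Nat) => (k : Int)) (List.range m))
    = (List.range m).foldl (pvStep iN) a := by
  induction m with
  | zero => rfl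
  | succ m ih =>
    rw [List.range_succ, List.map_append, List.foldl_append, List.foldl_append, ih]
    simp [pvStep, PySem.List.pyGetD_natCast]

lemma pvFoldSortOuter (n : Nat) (numbers : List Int) : ∀ (m : Nat),
    List.foldl (fun (a : List Int) (i : Int) =>
      List.foldl (fun (b : List Int) (j : Int) =>
        if PySem.List.pyGetD b i 0 > PySem.List.pyGetD b j 0
        then (b.set i.toNat (PySem.List.pyGetD b j 0)).set j.toNat (PySem.List.pyGetD b i 0)
        else b) a (List.map (fun (k : Nat) => (k : Int)) (List.range n)))
      numbers (List.map (fun (k : Nat) => (k : Int)) (List.range m))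
    = (List.range m).foldl (fun a i => (List.range n).foldl (pvStep i) a) numbers := by
  intro m
  induction m with
  | zero => rfl
  | succ m ih =>
    rw [List.range_succ, List.map_append, List.foldl_append, List.foldl_append, ih]
    simp only [List.foldl_cons, List.foldl_nil]
    exact pvFoldSortInner m _ n

lemma pvSortLoop_eq (numbers : List Int) :
    (PySem.List.pyRange 0 (numbers.length : Int)).foldl (fun a i =>
      (PySem.List.pyRange 0 (numbers.length : Int)).foldl (fun b j =>
        if PySem.List.pyGetD b i 0 > PySem.List.pyGetD b j 0
        then (b.set i.toNat (PySem.List.pyGetD b j 0)).set j.toNat (PySem.List.pyGetD b i 0)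
        else b) a) numbers
    = pvSortA numbers := by
  rw [PySem.List.pyRange_zero_nat]
  exact pvFoldSortOuter numbers.length numbers numbers.length

-- ---------- A side: the two-pointer loop ----------

lemma pvFlatShift (f : Nat → List Int) (m : Nat) :
    (List.range (m + 1)).flatMap f = f 0 ++ (List.range m).flatMap (fun t => f (t + 1)) := by
  rw [List.range_succ_eq_map, List.flatMap_cons, List.flatMap_map]

lemma pvTwoPtr_eq (nums : List Int) :
    ∀ (fuel : Nat) (l r : Int) (acc : List Int), (r - l).toNat ≤ fuel →
    pvTwoPtr nums l r acc = acc ++ (List.range (((r - l).toNat + 1) / 2)).flatMap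
      (fun (t : Nat) => [PySem.List.pyGetD nums (l + (t : Int)) 0, PySem.List.pyGetD nums (r - (t : Int)) 0]) := by
  intro fuel
  induction fuel with
  | zero =>
    intro l r acc h
    rw [pvTwoPtr, if_neg (by omega)]
    rw [show ((r - l).toNat + 1) / 2 = 0 by omega]
    simp
  | succ fuel ih =>
    intro l r acc h
    by_cases hlr : l < r
    · rw [pvTwoPtr, if_pos hlr, ih (l + 1) (r - 1) _ (by omega)]
      rw [show ((r - l).toNat + 1) / 2 = ((r - 1 - (l + 1)).toNat + 1) / 2 + 1 by omega]
      rw [pvFlatShift, List.append_assoc]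
      congr 1
      congr 1
      · norm_num
      · apply List.flatMap_congr
        intro t _
        push_cast
        rw [show l + ((t : Int) + 1) = l + 1 + (t : Int) by ring,
            show r - ((t : Int) + 1) = r - 1 - (t : Int) by ring]
    · rw [pvTwoPtr, if_neg hlr]
      rw [show ((r - l).toNat + 1) / 2 = 0 by omega]
      simp

-- ---------- blocks of length 2 ----------

lemma pvTakeBlocks (f : Nat → List Int) (hf : ∀ t, (f t).length = 2) :
    ∀ (L : List Nat) (K : Nat), (L.flatMap f).take (2 * K) = (L.take K).flatMap f := by
  intro L
  induction L with
  | nil => intro K; simp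
  | cons t L' ih =>
    intro K
    cases K with
    | zero => simp
    | succ K =>
      rw [List.flatMap_cons, List.take_append]
      rw [List.take_of_length_le (by rw [hf t]; omega)]
      rw [hf t]
      rw [show 2 * (K + 1) - 2 = 2 * K by omega, ih K]
      rw [List.take_succ_cons, List.flatMap_cons]

-- ---------- B side: bounded selection = take 5 of the sorted list ----------

-- length of the maximal prefix whose elements are ≥ x
def pvCut (x : Int) : List Int → Nat
  | [] => 0
  | y :: t => if x ≤ y then pvCut x t + 1 else 0

lemma pvCut_le (x : Int) (l : List Int) : pvCut x l ≤ l.length := by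
  induction l with
  | nil => simp [pvCut]
  | cons y t ih =>
    simp only [pvCut, List.length_cons]
    split <;> omega

lemma pvCut_take_mem (x : Int) (l : List Int) : ∀ y ∈ l.take (pvCut x l), x ≤ y := by
  induction l with
  | nil => simp
  | cons z t ih =>
    simp only [pvCut]
    split
    · next h =>
      intro y hy
      rw [List.take_succ_cons] at hy
      rcases List.mem_cons.mp hy with h1 | h1
      · omega
      · exact ih y h1
    · simp

lemma pvCut_drop_mem (x : Int) (l : List Int) (hl : l.Pairwise (fun a b => b ≤ a)) :
    ∀ y ∈ l.drop (pvCut x l), y < x := by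
  induction l with
  | nil => simp
  | cons z t ih =>
    rcases List.pairwise_cons.mp hl with ⟨hz, ht⟩
    simp only [pvCut]
    split
    · next h =>
      intro y hy
      rw [List.drop_succ_cons] at hy
      exact ih ht y hy
    · next h =>
      intro y hy
      rcases List.mem_cons.mp (by simpa using hy) with h1 | h1
      · omega
      · have := hz y h1; omega

lemma pvCut_take (x : Int) (l : List Int) : ∀ k, pvCut x (l.take k) = min (pvCut x l) k := by
  induction l with
  | nil => intro k; simp [pvCut]
  | cons z t ih =>
    intro k
    cases k with
    | zero => simp [pvCut]
    | succ k =>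
      rw [List.take_succ_cons]
      simp only [pvCut]
      split <;> simp [ih]

-- pvBestPos: specification of the scan
lemma pvBestPos_le (best : List Int) (x : Int) (better : Int → Int → Bool) :
    ∀ p, pvBestPos best x better p ≤ p := by
  intro p
  induction p with
  | zero => simp [pvBestPos]
  | succ p ih => simp only [pvBestPos]; split <;> omega

lemma pvBestPos_spec2 (best : List Int) (x : Int) (better : Int → Int → Bool) :
    ∀ p, ∀ t, pvBestPos best x better p ≤ t → t < p →
      better x (best.getD t 0) = true := by
  intro p
  induction p with
  | zero => intro t h1 h2; omega
  | succ p ih =>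
    intro t h1 h2
    simp only [pvBestPos, PySem.List.pyGetD_natCast] at h1
    by_cases hc : better x (best.getD p 0) = true
    · rw [if_pos hc] at h1
      rcases Nat.lt_succ_iff_lt_or_eq.mp h2 with h | h
      · exact ih t h1 h
      · rw [h]; exact hc
    · rw [if_neg hc] at h1; omega

lemma pvBestPos_spec3 (best : List Int) (x : Int) (better : Int → Int → Bool) :
    ∀ p, pvBestPos best x better p = 0 ∨
      better x (best.getD (pvBestPos best x better p - 1) 0) = false := by
  intro p
  induction p with
  | zero => left; simp [pvBestPos]
  | succ p ih =>
    simp only [pvBestPos, PySem.List.pyGetD_natCast]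
    by_cases hc : better x (best.getD p 0) = true
    · rw [if_pos hc]; exact ih
    · rw [if_neg hc]; right; simpa using hc

lemma pvBestPos_gt_eq_cut (best : List Int) (x : Int)
    (hdesc : best.Pairwise (fun a b => b ≤ a)) :
    pvBestPos best x (fun a b => decide (a > b)) best.length = pvCut x best := by
  set pos := pvBestPos best x (fun a b => decide (a > b)) best.length with hposdef
  have hple : pos ≤ best.length := pvBestPos_le best x _ best.length
  have hcle : pvCut x best ≤ best.length := pvCut_le x best
  rcases lt_trichotomy pos (pvCut x best) with h | h | h
  · exfalso
    have hposlen : pos < best.length := by omega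
    have hspec := pvBestPos_spec2 best x (fun a b => decide (a > b)) best.length pos le_rfl hposlen
    have hgt : best.getD pos 0 < x := by simpa using hspec
    have hmem : best.getD pos 0 ∈ best.take (pvCut x best) := by
      rw [List.getD_eq_getElem _ _ hposlen]
      have hl : pos < (best.take (pvCut x best)).length := by
        rw [List.length_take]; omega
      have he : (best.take (pvCut x best))[pos] = best[pos] := List.getElem_take
      rw [← he]
      exact List.getElem_mem hl
    have := pvCut_take_mem x best _ hmem
    omega
  · exact h
  · exfalso
    rcases pvBestPos_spec3 best x (fun a b => decide (a > b)) best.length with h0 | hf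
    · rw [← hposdef] at h0; omega
    · rw [← hposdef] at hf
      have hle : x ≤ best.getD (pos - 1) 0 := by simpa using hf
      have hlen1 : pos - 1 < best.length := by omega
      have hmem : best.getD (pos - 1) 0 ∈ best.drop (pvCut x best) := by
        rw [List.getD_eq_getElem _ _ hlen1]
        have hl : pos - 1 - pvCut x best < (best.drop (pvCut x best)).length := by
          rw [List.length_drop]; omega
        have he : (best.drop (pvCut x best))[pos - 1 - pvCut x best] = best[pos - 1] := by
          rw [List.getElem_drop]
          congr 1
          omega
        rw [← he]
        exact List.getElem_mem hl
      have := pvCut_drop_mem x best hdesc _ hmem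
      omega

-- inserting x into a descending list at pvCut keeps it descending
lemma pvInsert_desc (R : List Int) (x : Int) (hR : R.Pairwise (fun a b => b ≤ a)) :
    (R.take (pvCut x R) ++ x :: R.drop (pvCut x R)).Pairwise (fun a b => b ≤ a) := by
  rw [List.pairwise_append]
  refine ⟨List.Pairwise.sublist (List.take_sublist _ _) hR, ?_, ?_⟩
  · rw [List.pairwise_cons]
    exact ⟨fun y hy => le_of_lt (pvCut_drop_mem x R hR y hy),
      List.Pairwise.sublist (List.drop_sublist _ _) hR⟩
  · intro a ha b hb
    have hxa : x ≤ a := pvCut_take_mem x R a ha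
    rcases List.mem_cons.mp hb with h1 | h1
    · omega
    · have := pvCut_drop_mem x R hR b h1; omega

-- the fold bodies of pvBest5, named (definitionally equal to the lambdas in pvBest5)
def pvGtStep (best : List Int) (x : Int) : List Int :=
  if pvBestPos best x (fun a b => decide (a > b)) best.length < 5
  then ((best.take (pvBestPos best x (fun a b => decide (a > b)) best.length) ++ [x])
        ++ best.drop (pvBestPos best x (fun a b => decide (a > b)) best.length)).take 5
  else best

def pvLtStep (best : List Int) (x : Int) : List Int :=
  if pvBestPos best x (fun a b => decide (a < b)) best.length < 5
  then ((best.take (pvBestPos best x (fun a b => decide (a < b)) best.length) ++ [x])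
        ++ best.drop (pvBestPos best x (fun a b => decide (a < b)) best.length)).take 5
  else best

lemma pvBest5_gt_fold (xs : List Int) :
    pvBest5 xs (fun a b => decide (a > b)) = xs.foldl pvGtStep [] := rfl

lemma pvBest5_lt_fold (xs : List Int) :
    pvBest5 xs (fun a b => decide (a < b)) = xs.foldl pvLtStep [] := rfl

-- one fold step of pvBest5 (gt) acting on `R.take 5` is insertion-then-truncate
lemma pvStepGt_eq (R : List Int) (x : Int) (hR : R.Pairwise (fun a b => b ≤ a)) :
    pvGtStep (R.take 5) x = (R.take (pvCut x R) ++ x :: R.drop (pvCut x R)).take 5 := by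
  have hd5 : (R.take 5).Pairwise (fun a b => b ≤ a) := List.Pairwise.sublist (List.take_sublist _ _) hR
  have hL : pvCut x R ≤ R.length := pvCut_le x R
  have hpos : pvBestPos (R.take 5) x (fun a b => decide (a > b)) (R.take 5).length
      = min (pvCut x R) 5 := by
    rw [pvBestPos_gt_eq_cut _ _ hd5, pvCut_take]
  set L := pvCut x R with hLdef
  have hlenL : (R.take L).length = L := by rw [List.length_take]; omega
  unfold pvGtStep
  rw [hpos]
  by_cases h5 : L < 5
  · rw [if_pos (by omega), min_eq_left (by omega)]
    rw [List.take_take, min_eq_left (by omega), List.drop_take]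
    have e1 : ((R.take L ++ [x]) ++ (R.drop L).take (5 - L)).take 5
        = R.take L ++ x :: (R.drop L).take (4 - L) := by
      rw [List.append_assoc, List.take_append, List.take_take,
        min_eq_right (by omega : L ≤ 5), hlenL, List.singleton_append]
      rw [show 5 - L = (4 - L) + 1 by omega, List.take_succ_cons]
      rw [List.take_take, min_eq_left (by omega)]
    have e2 : (R.take L ++ x :: R.drop L).take 5
        = R.take L ++ x :: (R.drop L).take (4 - L) := by
      rw [List.take_append, hlenL, List.take_take, min_eq_right (by omega : L ≤ 5)]
      rw [show 5 - L = (4 - L) + 1 by omega, List.take_succ_cons]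
    rw [e1, e2]
  · rw [min_eq_right (by omega), if_neg (by omega)]
    rw [List.take_append, hlenL]
    rw [show 5 - L = 0 by omega, List.take_zero, List.append_nil]
    rw [List.take_take, min_eq_left (by omega)]

lemma pvBest5_gt (xs : List Int) :
    pvBest5 xs (fun a b => decide (a > b)) = (PySem.List.sorted xs (fun v => v)).reverse.take 5 := by
  induction xs using List.reverseRecOn with
  | nil =>
    rw [show PySem.List.sorted ([] : List Int) (fun v => v) = [] from
      (PySem.List.sorted_eq_nil_iff _ _ _).mpr rfl]
    rfl
  | append_singleton xs x ih =>
    have hS := PySem.List.sorted_pairwise xs (fun v => v)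
    set S := PySem.List.sorted xs (fun v => v) with hSdef
    have hR : S.reverse.Pairwise (fun a b => b ≤ a) := by
      rw [List.pairwise_reverse]; exact hS
    have hnew : PySem.List.sorted (xs ++ [x]) (fun v => v)
        = (S.reverse.take (pvCut x S.reverse) ++ x :: S.reverse.drop (pvCut x S.reverse)).reverse := by
      apply PySem.List.sorted_id_eq_of_perm_of_pairwise
      · refine (List.reverse_perm _).trans ?_
        have p1 : (S.reverse.take (pvCut x S.reverse) ++ x :: S.reverse.drop (pvCut x S.reverse)).Perm
            (x :: S.reverse) := by
          have hm := List.perm_middle (a := x)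
            (l₁ := S.reverse.take (pvCut x S.reverse)) (l₂ := S.reverse.drop (pvCut x S.reverse))
          rwa [List.take_append_drop] at hm
        have p2 : (x :: S.reverse).Perm (x :: xs) :=
          List.Perm.cons x ((S.reverse_perm).trans (PySem.List.sorted_perm xs (fun v => v) false))
        exact (p1.trans p2).trans (List.perm_append_singleton x xs).symm
      · rw [List.pairwise_reverse]
        exact pvInsert_desc S.reverse x hR
    rw [pvBest5_gt_fold, List.foldl_append, List.foldl_cons, List.foldl_nil,
      ← pvBest5_gt_fold, ih, hnew, List.reverse_reverse]
    exact pvStepGt_eq S.reverse x hR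

-- the `<` selection is the `>` selection of the negated list
lemma pvBestPos_neg (best : List Int) (x : Int) :
    ∀ p, p ≤ best.length →
      pvBestPos best x (fun a b => decide (a < b)) p
      = pvBestPos (best.map (fun v => -v)) (-x) (fun a b => decide (a > b)) p := by
  intro p
  induction p with
  | zero => intro _; rfl
  | succ p ih =>
    intro hp
    simp only [pvBestPos, PySem.List.pyGetD_natCast]
    have hplen : p < best.length := by omega
    have hmap : (best.map (fun v => -v)).getD p 0 = -(best.getD p 0) := by
      rw [List.getD_eq_getElem _ _ (by simpa using hplen), List.getD_eq_getElem _ _ hplen,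
        List.getElem_map]
    rw [hmap]
    have hcond : (decide (-x > -(best.getD p 0))) = (decide (x < best.getD p 0)) := by
      simp
    rw [hcond]
    by_cases hc : (decide (x < best.getD p 0)) = true
    · rw [if_pos hc, if_pos hc]
      exact ih (by omega)
    · rw [if_neg hc, if_neg hc]

lemma pvMapNegNeg (l : List Int) : (l.map (fun v => -v)).map (fun v => -v) = l := by
  rw [List.map_map]
  simp

lemma pvStepNeg (best : List Int) (x : Int) :
    pvLtStep best x = (pvGtStep (best.map (fun v => -v)) (-x)).map (fun v => -v) := by
  unfold pvLtStep pvGtStep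
  rw [show (best.map (fun v => -v)).length = best.length from by simp]
  rw [← pvBestPos_neg best x best.length le_rfl]
  by_cases h : pvBestPos best x (fun a b => decide (a < b)) best.length < 5
  · rw [if_pos h, if_pos h]
    simp only [List.map_take, List.map_append, List.map_drop, List.map_cons, List.map_nil,
      List.map_map, neg_neg, Function.comp_def, List.map_id']
  · rw [if_neg h, if_neg h, pvMapNegNeg]

lemma pvFoldNeg : ∀ (xs best : List Int),
    xs.foldl pvLtStep best
    = ((xs.map (fun v => -v)).foldl pvGtStep (best.map (fun v => -v))).map (fun v => -v) := by
  intro xs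
  induction xs with
  | nil => intro best; simp
  | cons x t ih =>
    intro best
    have hb : (pvLtStep best x).map (fun v => -v) = pvGtStep (best.map (fun v => -v)) (-x) := by
      rw [pvStepNeg, pvMapNegNeg]
    rw [List.foldl_cons, List.map_cons, List.foldl_cons, ih (pvLtStep best x), hb]

lemma pvSorted_neg (xs : List Int) :
    PySem.List.sorted (xs.map (fun v => -v)) (fun v => v)
    = ((PySem.List.sorted xs (fun v => v)).map (fun v => -v)).reverse := by
  apply PySem.List.sorted_id_eq_of_perm_of_pairwise
  · exact (List.reverse_perm _).trans ((PySem.List.sorted_perm xs (fun v => v) false).map _)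
  · rw [List.pairwise_reverse, List.pairwise_map]
    exact (PySem.List.sorted_pairwise xs (fun v => v)).imp (fun h => neg_le_neg h)

lemma pvBest5_lt (xs : List Int) :
    pvBest5 xs (fun a b => decide (a < b)) = (PySem.List.sorted xs (fun v => v)).take 5 := by
  rw [pvBest5_lt_fold, pvFoldNeg xs [], List.map_nil, ← pvBest5_gt_fold, pvBest5_gt,
    pvSorted_neg, List.reverse_reverse, List.map_take, pvMapNegNeg]

-- ---------- final assembly ----------

lemma pvFoldPairs (big small : List Int) : ∀ (K : Nat),
    List.foldl (fun (acc : List Int) (i : Int) =>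
      acc ++ [PySem.List.pyGetD big i 0, PySem.List.pyGetD small i 0]) []
      (List.map (fun (k : Nat) => (k : Int)) (List.range K))
    = (List.range K).flatMap (fun t => [big.getD t 0, small.getD t 0]) := by
  intro K
  induction K with
  | zero => rfl
  | succ K ih =>
    rw [List.range_succ, List.map_append, List.foldl_append, ih, List.flatMap_append]
    simp [PySem.List.pyGetD_natCast]

lemma pvA_eq (numbers : List Int) :
    strange_sort numbers = PySem.Str.join " "
      (((List.range (min 5 (numbers.length / 2))).flatMap
        (fun (t : Nat) => [PySem.List.pyGetD (pvSortA numbers) (0 + (t : Int)) 0,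
                   PySem.List.pyGetD (pvSortA numbers) (((numbers.length : Int) - 1) - (t : Int)) 0])).map
        PySem.Int.toStr) := by
  simp only [strange_sort]
  rw [pvSortLoop_eq]
  rw [pvTwoPtr_eq (pvSortA numbers) (((numbers.length : Int) - 1 - 0).toNat)
    0 ((numbers.length : Int) - 1) [] le_rfl]
  rw [List.nil_append]
  rw [PySem.List.slice_to _ (by norm_num)]
  rw [show ((10 : Int)).toNat = 10 from rfl]
  rw [show ((((numbers.length : Int)) - 1 - 0).toNat + 1) / 2 = numbers.length / 2 from by omega]
  rw [show (10 : Nat) = 2 * 5 from rfl]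
  rw [pvTakeBlocks _ (fun t => rfl) (List.range (numbers.length / 2)) 5]
  rw [List.take_range]

lemma pvAlt_eq (numbers : List Int) :
    strange_sort_alt numbers = PySem.Str.join " "
      (((List.range (min 5 (numbers.length / 2))).flatMap
        (fun t => [(pvBest5 numbers (fun a b => decide (a > b))).getD t 0,
                   (pvBest5 numbers (fun a b => decide (a < b))).getD t 0])).map
        PySem.Int.toStr) := by
  simp only [strange_sort_alt]
  rw [show PySem.Int.floordiv ((numbers.length : Int)) 2 = ((numbers.length / 2 : Nat) : Int) from by
    exact_mod_cast PySem.Int.floordiv_natCast numbers.length 2]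
  rw [show min (5 : Int) ((numbers.length / 2 : Nat) : Int)
      = ((min 5 (numbers.length / 2) : Nat) : Int) from by push_cast; rfl]
  rw [PySem.List.pyRange_zero_nat]
  exact congrArg (fun L => PySem.Str.join " " (L.map PySem.Int.toStr))
    (pvFoldPairs (pvBest5 numbers (fun a b => decide (a > b)))
      (pvBest5 numbers (fun a b => decide (a < b))) (min 5 (numbers.length / 2)))

-- ===== VERDICT (by name: the statement is the Claim_ definition above) =====
theorem strange_sort_spec : Claim_equal_strange_sort := by
  intro numbers _
  unfold Spec_strange_sort
  rw [pvA_eq, pvAlt_eq]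
  congr 1
  congr 1
  apply List.flatMap_congr
  intro t ht
  rw [List.mem_range] at ht
  have ht5 : t < 5 := by omega
  have htn2 : t < numbers.length / 2 := by omega
  have htn : t < numbers.length := by omega
  have hbig : (pvBest5 numbers (fun a b => decide (a > b))).getD t 0
      = (pvSortA numbers).getD t 0 := by
    rw [pvBest5_gt, ← pvSortA_eq]
    have h1 : t < ((pvSortA numbers).take 5).length := by
      rw [List.length_take, pvSortA_len]; omega
    rw [List.getD_eq_getElem _ _ h1,
      List.getD_eq_getElem _ _ (by rw [pvSortA_len]; exact htn)]
    exact List.getElem_take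
  have hlenS : (PySem.List.sorted numbers (fun v => v)).length = numbers.length :=
    (PySem.List.sorted_perm numbers (fun v => v) false).length_eq
  have hsmall : (pvBest5 numbers (fun a b => decide (a < b))).getD t 0
      = (pvSortA numbers).getD (numbers.length - 1 - t) 0 := by
    rw [pvBest5_lt, pvSortA_eq]
    have h1 : t < ((PySem.List.sorted numbers (fun v => v)).take 5).length := by
      rw [List.length_take, hlenS]; omega
    have h2 : numbers.length - 1 - t < (PySem.List.sorted numbers (fun v => v)).reverse.length := by
      rw [List.length_reverse, hlenS]; omega
    rw [List.getD_eq_getElem _ _ h1, List.getD_eq_getElem _ _ h2]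
    rw [List.getElem_take, List.getElem_reverse]
    congr 1
    omega
  rw [zero_add, PySem.List.pyGetD_natCast]
  rw [PySem.List.pyGetD_of_nonneg _ _ (by omega : (0 : Int) ≤ ((numbers.length : Int)) - 1 - (t : Int))]
  rw [show (((numbers.length : Int)) - 1 - (t : Int)).toNat = numbers.length - 1 - t from by omega]
  rw [hbig, hsmall]
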